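-- pv_equiv track=rewrite | github.com/juanitapombo/analyses | Brushed_Radial_Density.py | extract_frame_data
-- ===== SOURCE A (Python) =====
-- def extract_frame_data(content, start_idx):
--     frame_data = []
--     idx = start_idx
--     MDstep, box, energy = None, None, None
--     while idx < len(content):
--         if content[idx].startswith("t ="):
--             MDstep = content[idx]
--         elif content[idx].startswith("b ="):
--             box = content[idx]
--         elif content[idx].startswith("E ="):
--             energy = content[idx]
--         else:
--             while idx < len(content) and not content[idx].startswith("t =") and not content[idx].startswith("b =") and not content[idx].startswith("E ="):
--                 frame_data.append(content[idx].strip())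
--                 idx += 1
--             break
--         idx += 1
--     return MDstep, box, energy, frame_data, idx
-- ===== SOURCE B (Python) =====
-- def _kind(line):
--     for p in ("t =", "b =", "E ="):
--         if line.startswith(p):
--             return p
--     return None
--
-- def extract_frame_data(content, start_idx):
--     n = len(content)
--     # classify the whole tail once into (kind, line) rows
--     rows = [(_kind(content[i]), content[i]) for i in range(start_idx, n)]
--     # boundary of the header block, then boundary of the data block
--     h = next((j for j, r in enumerate(rows) if r[0] is None), len(rows))
--     hdr, body = rows[:h], rows[h:]
--     d = next((j for j, r in enumerate(body) if r[0] is not None), len(body))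
--     # last-header-wins: search the header block from the back per prefix
--     def last(prefix):
--         for k, line in reversed(hdr):
--             if k == prefix:
--                 return line
--         return None
--     frame = [line.strip() for _, line in body[:d]]
--     return last("t ="), last("b ="), last("E ="), frame, start_idx + h + d
-- ===== Notes on version B (the rewrite author's own statement) =====
-- stated objective: alternative
-- what changed: B replaces A's stateful outer dispatch loop with nested collecting loop and break by a data-flow pipeline: it classifies the whole tail once into a list of (kind, line) rows, locates the header/data boundaries with findIdx-style searches, resolves last-header-wins by a backward search over the header slice per prefix, and renders the data block by one slice-and-strip comprehension.
import Mathlib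
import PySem

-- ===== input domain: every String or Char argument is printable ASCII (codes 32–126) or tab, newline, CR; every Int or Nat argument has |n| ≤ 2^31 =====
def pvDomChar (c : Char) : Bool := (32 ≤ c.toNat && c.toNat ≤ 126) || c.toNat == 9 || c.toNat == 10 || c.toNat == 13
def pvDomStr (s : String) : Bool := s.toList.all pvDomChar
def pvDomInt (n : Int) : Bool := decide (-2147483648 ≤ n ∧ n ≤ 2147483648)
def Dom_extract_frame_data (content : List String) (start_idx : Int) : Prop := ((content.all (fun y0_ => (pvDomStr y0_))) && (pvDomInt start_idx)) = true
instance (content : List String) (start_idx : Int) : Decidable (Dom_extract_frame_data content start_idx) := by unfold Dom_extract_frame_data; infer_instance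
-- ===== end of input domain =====

-- B replaces A's stateful outer dispatch loop (with a nested collecting loop and break) by a
-- data-flow pipeline: classify the whole tail once into (kind, line) rows, locate the header/data
-- boundaries with findIdx searches, resolve last-header-wins by a backward search over the header
-- slice, and render the data block by one slice-and-strip map; objective: alternative, same cost.
-- The 'fuel' argument of A's loops only makes them total: one unit per iteration, started with
-- enough fuel for the index to reach len(content), exactly the iterations the Python performs.

-- content[idx] with Python semantics (negative wraps; the default "" is only reached outside Pre_)
def pvGetS (content : List String) (idx : Int) : String :=
  (PySem.List.pyGet? content idx).getD ""

-- ===== PORT A =====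
-- inner while: collect stripped non-header lines
def aInner (content : List String) (fuel : Nat) (idx : Int) (frame : List String) : List String × Int :=
  match fuel with
  | 0 => (frame, idx)
  | fuel + 1 =>
    if idx < (content.length : Int) ∧
        ¬ PySem.Str.startswith (pvGetS content idx) "t =" = true ∧
        ¬ PySem.Str.startswith (pvGetS content idx) "b =" = true ∧
        ¬ PySem.Str.startswith (pvGetS content idx) "E =" = true then
      aInner content fuel (idx + 1) (frame ++ [PySem.Str.strip (pvGetS content idx)])
    else (frame, idx)

-- outer while: dispatch on the three header prefixes, else run the inner loop and break
def aOuter (content : List String) (fuel : Nat) (idx : Int)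
    (MDstep box energy : Option String) :
    Option String × Option String × Option String × List String × Int :=
  match fuel with
  | 0 => (MDstep, box, energy, [], idx)
  | fuel + 1 =>
    if idx < (content.length : Int) then
      let s := pvGetS content idx
      if PySem.Str.startswith s "t =" then aOuter content fuel (idx + 1) (some s) box energy
      else if PySem.Str.startswith s "b =" then aOuter content fuel (idx + 1) MDstep (some s) energy
      else if PySem.Str.startswith s "E =" then aOuter content fuel (idx + 1) MDstep box (some s)
      else
        let p := aInner content (fuel + 1) idx []
        (MDstep, box, energy, p.1, p.2)
    else (MDstep, box, energy, [], idx)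

def extract_frame_data (content : List String) (start_idx : Int) :
    Option String × Option String × Option String × List String × Int :=
  aOuter content ((content.length : Int) - start_idx).toNat start_idx none none none

-- ===== PORT B =====
-- _kind: first matching header prefix, if any
def bKind (line : String) : Option String :=
  if PySem.Str.startswith line "t =" then some "t ="
  else if PySem.Str.startswith line "b =" then some "b ="
  else if PySem.Str.startswith line "E =" then some "E ="
  else none

-- rows = [(_kind(content[i]), content[i]) for i in range(start_idx, n)]
def bRows (content : List String) (start_idx : Int) : List (Option String × String) :=
  (PySem.List.pyRange start_idx (content.length : Int) 1).map
    (fun i => (bKind (pvGetS content i), pvGetS content i))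

-- def last(prefix): backward scan over the header slice
def bLast (hdr : List (Option String × String)) (pre : String) : Option String :=
  (hdr.reverse.find? (fun r => r.1 == some pre)).map (fun r => r.2)

-- 'next((j for j, r in ...), len(...))' is List.findIdx (length when absent);
-- rows[:h] / rows[h:] / body[:d] with 0 ≤ h ≤ len (h a findIdx result) are take / drop.
def extract_frame_data_alt (content : List String) (start_idx : Int) :
    Option String × Option String × Option String × List String × Int :=
  let rows := bRows content start_idx
  let h := rows.findIdx (fun r => r.1 == none)
  let hdr := rows.take h
  let body := rows.drop h
  let d := body.findIdx (fun r => !(r.1 == none))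
  let frame := (body.take d).map (fun r => PySem.Str.strip r.2)
  (bLast hdr "t =", bLast hdr "b =", bLast hdr "E =", frame, start_idx + (h : Int) + (d : Int))

-- ===== PRECONDITION & SPEC =====
-- Pre_ excludes exactly start_idx < -len(content), where Python A (and B) raise IndexError.
def Pre_extract_frame_data (content : List String) (start_idx : Int) : Prop :=
  -(content.length : Int) ≤ start_idx
instance (content : List String) (start_idx : Int) : Decidable (Pre_extract_frame_data content start_idx) := by unfold Pre_extract_frame_data; infer_instance

def pvWitness_extract_frame_data : List String × Int := (["t = 100", "1.0 2.0", "3.0 4.0"], 0)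

def Spec_extract_frame_data (content : List String) (start_idx : Int) (out : Option String × Option String × Option String × List String × Int) : Prop := out = extract_frame_data_alt content start_idx
instance (content : List String) (start_idx : Int) (out : Option String × Option String × Option String × List String × Int) : Decidable (Spec_extract_frame_data content start_idx out) := by unfold Spec_extract_frame_data; infer_instance

-- ===== CLAIM (what is proved, stated in full; the proofs are below) =====
def Claim_equal_extract_frame_data : Prop := ∀ (content : List String) (start_idx : Int), Dom_extract_frame_data content start_idx → Pre_extract_frame_data content start_idx → Spec_extract_frame_data content start_idx (extract_frame_data content start_idx)

-- ===== LEMMAS AND PROOFS =====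

-- Proof-side intermediate loops: A's two loops re-expressed as a header phase and a data phase.
def bPhase1 (content : List String) (fuel : Nat) (idx : Int) (hdrs : PySem.Dict String String) :
    PySem.Dict String String × Int :=
  match fuel with
  | 0 => (hdrs, idx)
  | fuel + 1 =>
    if idx < (content.length : Int) then
      match bKind (pvGetS content idx) with
      | some k => bPhase1 content fuel (idx + 1) (hdrs.insert k (pvGetS content idx))
      | none => (hdrs, idx)
    else (hdrs, idx)

def bPhase2 (content : List String) (fuel : Nat) (idx : Int) : Int :=
  match fuel with
  | 0 => idx
  | fuel + 1 =>
    if idx < (content.length : Int) ∧ bKind (pvGetS content idx) = none then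
      bPhase2 content fuel (idx + 1)
    else idx

theorem bKind_eq_none_iff (s : String) :
    bKind s = none ↔
      ¬ PySem.Str.startswith s "t =" = true ∧
      ¬ PySem.Str.startswith s "b =" = true ∧
      ¬ PySem.Str.startswith s "E =" = true := by
  unfold bKind; split_ifs <;> simp_all

theorem bPhase2_ge (content : List String) (fuel : Nat) (idx : Int) :
    idx ≤ bPhase2 content fuel idx := by
  induction fuel generalizing idx with
  | zero => simp [bPhase2]
  | succ fuel ih =>
    rw [bPhase2]
    split_ifs with h
    · have := ih (idx + 1); omega
    · omega

theorem bPhase2_fuel_irrel (content : List String) (fuel fuel' : Nat) (idx : Int)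
    (hf : ((content.length : Int) - idx).toNat ≤ fuel)
    (hf' : ((content.length : Int) - idx).toNat ≤ fuel') :
    bPhase2 content fuel idx = bPhase2 content fuel' idx := by
  induction fuel generalizing fuel' idx with
  | zero =>
    match fuel' with
    | 0 => rfl
    | fuel' + 1 =>
      rw [bPhase2, bPhase2]
      split_ifs with h
      · omega
      · rfl
  | succ fuel ih =>
    match fuel' with
    | 0 =>
      rw [bPhase2, bPhase2]
      split_ifs with h
      · omega
      · rfl
    | fuel' + 1 =>
      rw [bPhase2, bPhase2]
      split_ifs with h
      · exact ih fuel' (idx + 1) (by omega) (by omega)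
      · rfl

theorem inner_eq (content : List String) (fuel : Nat) (idx : Int) (frame : List String)
    (hf : ((content.length : Int) - idx).toNat ≤ fuel) :
    aInner content fuel idx frame =
      (frame ++ (PySem.List.pyRange idx (bPhase2 content fuel idx) 1).map
        (fun j => PySem.Str.strip (pvGetS content j)),
       bPhase2 content fuel idx) := by
  induction fuel generalizing idx frame with
  | zero =>
    rw [aInner, bPhase2]
    simp [PySem.List.pyRange_one_eq_nil (le_refl idx)]
  | succ fuel ih =>
    rw [aInner, bPhase2]
    by_cases h : idx < (content.length : Int) ∧
        ¬ PySem.Str.startswith (pvGetS content idx) "t =" = true ∧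
        ¬ PySem.Str.startswith (pvGetS content idx) "b =" = true ∧
        ¬ PySem.Str.startswith (pvGetS content idx) "E =" = true
    · have hk : bKind (pvGetS content idx) = none := (bKind_eq_none_iff _).2 ⟨h.2.1, h.2.2⟩
      rw [if_pos h, if_pos ⟨h.1, hk⟩, ih (idx + 1) _ (by omega)]
      have hlt : idx < bPhase2 content fuel (idx + 1) := by
        have := bPhase2_ge content fuel (idx + 1); omega
      rw [PySem.List.pyRange_one_cons hlt]
      simp
    · have hk : ¬ (idx < (content.length : Int) ∧ bKind (pvGetS content idx) = none) := by
        intro hc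
        exact h ⟨hc.1, (bKind_eq_none_iff _).1 hc.2⟩
      rw [if_neg h, if_neg hk]
      simp [PySem.List.pyRange_one_eq_nil (le_refl idx)]

theorem bPhase1_ge (content : List String) (fuel : Nat) (idx : Int) (d : PySem.Dict String String) :
    idx ≤ (bPhase1 content fuel idx d).2 := by
  induction fuel generalizing idx d with
  | zero => simp [bPhase1]
  | succ fuel ih =>
    rw [bPhase1]
    split_ifs with h
    · cases hk : bKind (pvGetS content idx) with
      | none => simp
      | some k =>
        simp only []
        have := ih (idx + 1) (d.insert k (pvGetS content idx))
        omega
    · simp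

theorem outer_eq (content : List String) (fuel : Nat) (idx : Int) (d : PySem.Dict String String)
    (hf : ((content.length : Int) - idx).toNat ≤ fuel) :
    aOuter content fuel idx (d.get? "t =") (d.get? "b =") (d.get? "E =") =
      ((bPhase1 content fuel idx d).1.get? "t =",
       (bPhase1 content fuel idx d).1.get? "b =",
       (bPhase1 content fuel idx d).1.get? "E =",
       (PySem.List.pyRange (bPhase1 content fuel idx d).2
         (bPhase2 content fuel (bPhase1 content fuel idx d).2) 1).map
         (fun j => PySem.Str.strip (pvGetS content j)),
       bPhase2 content fuel (bPhase1 content fuel idx d).2) := by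
  induction fuel generalizing idx d with
  | zero =>
    rw [aOuter, bPhase1, bPhase2]
    simp [PySem.List.pyRange_one_eq_nil (le_refl idx)]
  | succ fuel ih =>
    rw [aOuter, bPhase1]
    by_cases h : idx < (content.length : Int)
    · rw [if_pos h, if_pos h]
      by_cases ht : PySem.Str.startswith (pvGetS content idx) "t =" = true
      · have hk : bKind (pvGetS content idx) = some "t =" := by unfold bKind; rw [if_pos ht]
        simp only [ht, if_true, hk]
        have step := ih (idx + 1) (d.insert "t =" (pvGetS content idx)) (by omega)
        rw [PySem.Dict.get?_insert_self,
            PySem.Dict.get?_insert_of_ne _ _ (by decide : ("b =" : String) ≠ "t ="),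
            PySem.Dict.get?_insert_of_ne _ _ (by decide : ("E =" : String) ≠ "t =")] at step
        rw [step]
        have hmono := bPhase1_ge content fuel (idx + 1) (d.insert "t =" (pvGetS content idx))
        rw [bPhase2_fuel_irrel content fuel (fuel + 1) _ (by omega) (by omega)]
      · by_cases hb : PySem.Str.startswith (pvGetS content idx) "b =" = true
        · have hk : bKind (pvGetS content idx) = some "b =" := by unfold bKind; rw [if_neg ht, if_pos hb]
          simp only [ht, hb, if_true]
          have step := ih (idx + 1) (d.insert "b =" (pvGetS content idx)) (by omega)
          rw [PySem.Dict.get?_insert_self,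
              PySem.Dict.get?_insert_of_ne _ _ (by decide : ("t =" : String) ≠ "b ="),
              PySem.Dict.get?_insert_of_ne _ _ (by decide : ("E =" : String) ≠ "b =")] at step
          rw [hk]
          simp only []
          rw [step]
          have hmono := bPhase1_ge content fuel (idx + 1) (d.insert "b =" (pvGetS content idx))
          rw [bPhase2_fuel_irrel content fuel (fuel + 1) _ (by omega) (by omega)]
          simp
        · by_cases he : PySem.Str.startswith (pvGetS content idx) "E =" = true
          · have hk : bKind (pvGetS content idx) = some "E =" := by unfold bKind; rw [if_neg ht, if_neg hb, if_pos he]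
            simp only [ht, hb, he, if_true]
            have step := ih (idx + 1) (d.insert "E =" (pvGetS content idx)) (by omega)
            rw [PySem.Dict.get?_insert_self,
                PySem.Dict.get?_insert_of_ne _ _ (by decide : ("t =" : String) ≠ "E ="),
                PySem.Dict.get?_insert_of_ne _ _ (by decide : ("b =" : String) ≠ "E =")] at step
            rw [hk]
            simp only []
            rw [step]
            have hmono := bPhase1_ge content fuel (idx + 1) (d.insert "E =" (pvGetS content idx))
            rw [bPhase2_fuel_irrel content fuel (fuel + 1) _ (by omega) (by omega)]
            simp
          · have hk : bKind (pvGetS content idx) = none := by unfold bKind; rw [if_neg ht, if_neg hb, if_neg he]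
            simp only [ht, hb, he]
            rw [hk]
            simp only []
            rw [inner_eq content (fuel + 1) idx [] (by omega)]
            simp
    · rw [if_neg h, if_neg h, bPhase2]
      have hk : ¬ (idx < (content.length : Int) ∧ bKind (pvGetS content idx) = none) := by
        intro hc; exact h hc.1
      rw [if_neg hk]
      simp [PySem.List.pyRange_one_eq_nil (le_refl idx)]

-- ==== bridge: the phase loops compute B's pipeline ====

theorem findIdx_eq_length_takeWhile {α : Type} (p : α → Bool) (l : List α) :
    l.findIdx p = (l.takeWhile (fun x => !p x)).length := by
  induction l with
  | nil => simp
  | cons a t ih =>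
    by_cases h : p a = true
    · simp [List.findIdx_cons, h]
    · simp [List.findIdx_cons, List.takeWhile_cons, h, ih]

theorem take_length_takeWhile {α : Type} (p : α → Bool) (l : List α) :
    l.take (l.takeWhile p).length = l.takeWhile p := by
  induction l with
  | nil => simp
  | cons a t ih =>
    by_cases h : p a = true <;> simp [List.takeWhile_cons, h, ih]

theorem pyRange_drop (b : Int) (h : Nat) (a : Int) :
    (PySem.List.pyRange a b 1).drop h = PySem.List.pyRange (a + h) b 1 := by
  induction h generalizing a with
  | zero => simp
  | succ h ih =>
    by_cases hab : a < b
    · rw [PySem.List.pyRange_one_cons hab, List.drop_succ_cons, ih (a + 1)]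
      congr 1
      push_cast
      ring
    · rw [PySem.List.pyRange_one_eq_nil (by omega), PySem.List.pyRange_one_eq_nil (by omega)]
      simp

theorem pyRange_take (b : Int) (t : Nat) (a : Int) (ht : t ≤ (b - a).toNat) :
    (PySem.List.pyRange a b 1).take t = PySem.List.pyRange a (a + t) 1 := by
  induction t generalizing a with
  | zero =>
    rw [List.take_zero, PySem.List.pyRange_one_eq_nil (by push_cast; omega)]
  | succ t ih =>
    have hab : a < b := by omega
    rw [PySem.List.pyRange_one_cons hab, List.take_succ_cons, ih (a + 1) (by omega),
        PySem.List.pyRange_one_cons (show a < a + ((t + 1 : Nat) : Int) by push_cast; omega)]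
    congr 2
    push_cast
    ring

theorem phase1_eq (content : List String) (fuel : Nat) (idx : Int) (dict : PySem.Dict String String)
    (hf : ((content.length : Int) - idx).toNat ≤ fuel) :
    bPhase1 content fuel idx dict =
      (((bRows content idx).takeWhile (fun r => r.1.isSome)).foldl
         (fun acc r => acc.insert (r.1.getD "") r.2) dict,
       idx + ((bRows content idx).takeWhile (fun r => r.1.isSome)).length) := by
  induction fuel generalizing idx dict with
  | zero =>
    rw [bPhase1]
    unfold bRows
    rw [PySem.List.pyRange_one_eq_nil (by omega)]
    simp
  | succ fuel ih =>
    rw [bPhase1]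
    by_cases h : idx < (content.length : Int)
    · rw [if_pos h]
      have hrows : bRows content idx =
          (bKind (pvGetS content idx), pvGetS content idx) :: bRows content (idx + 1) := by
        unfold bRows
        rw [PySem.List.pyRange_one_cons h]
        simp
      cases hk : bKind (pvGetS content idx) with
      | some k =>
        rw [hrows, hk]
        simp only [List.takeWhile_cons, Option.isSome_some, if_true, List.foldl_cons,
          List.length_cons, Option.getD_some]
        rw [ih (idx + 1) _ (by omega)]
        congr 1
        push_cast
        ring
      | none =>
        rw [hrows, hk]
        simp [List.takeWhile_cons]
    · rw [if_neg h]
      unfold bRows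
      rw [PySem.List.pyRange_one_eq_nil (by omega)]
      simp

theorem phase2_eq (content : List String) (fuel : Nat) (idx : Int)
    (hf : ((content.length : Int) - idx).toNat ≤ fuel) :
    bPhase2 content fuel idx =
      idx + ((bRows content idx).takeWhile (fun r => r.1.isNone)).length := by
  induction fuel generalizing idx with
  | zero =>
    rw [bPhase2]
    unfold bRows
    rw [PySem.List.pyRange_one_eq_nil (by omega)]
    simp
  | succ fuel ih =>
    rw [bPhase2]
    by_cases h : idx < (content.length : Int)
    · have hrows : bRows content idx =
          (bKind (pvGetS content idx), pvGetS content idx) :: bRows content (idx + 1) := by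
        unfold bRows
        rw [PySem.List.pyRange_one_cons h]
        simp
      cases hk : bKind (pvGetS content idx) with
      | some k =>
        rw [if_neg (by simp [hk]), hrows, hk]
        simp [List.takeWhile_cons]
      | none =>
        rw [if_pos ⟨h, rfl⟩, hrows, hk, ih (idx + 1) (by omega)]
        simp only [List.takeWhile_cons, Option.isNone_none, if_true, List.length_cons]
        push_cast
        ring
    · rw [if_neg (by tauto)]
      unfold bRows
      rw [PySem.List.pyRange_one_eq_nil (by omega)]
      simp

theorem get?_foldl_insert (l : List (Option String × String)) (dict : PySem.Dict String String)
    (p : String) (hall : ∀ r ∈ l, r.1 ≠ none) :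
    (l.foldl (fun acc r => acc.insert (r.1.getD "") r.2) dict).get? p =
      match l.reverse.find? (fun r => r.1 == some p) with
      | some r => some r.2
      | none => dict.get? p := by
  induction l generalizing dict with
  | nil => simp
  | cons r t ih =>
    obtain ⟨k, hk⟩ : ∃ k, r.1 = some k := Option.ne_none_iff_exists'.1 (hall r (by simp))
    simp only [List.foldl_cons, List.reverse_cons]
    rw [ih _ (fun x hx => hall x (by simp [hx]))]
    cases hfind : t.reverse.find? (fun r => r.1 == some p) with
    | some r' => simp [List.find?_append, hfind]
    | none =>
      simp only [List.find?_append, hfind, Option.none_or, Option.orElse]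
      by_cases hkp : k = p
      · subst hkp
        simp [List.find?_cons, hk, PySem.Dict.get?_insert_self]
      · rw [hk]
        simp only [Option.getD_some]
        rw [PySem.Dict.get?_insert_of_ne _ _ (fun hpk => hkp hpk.symm)]
        simp [List.find?_cons, hk, hkp]

-- ===== VERDICT (by name: the statement is the Claim_ definition above) =====
theorem extract_frame_data_spec : Claim_equal_extract_frame_data := by
  intro content start_idx _ _
  show extract_frame_data content start_idx = extract_frame_data_alt content start_idx
  have hpred1 : (fun r : Option String × String => !(r.1 == none)) = fun r => r.1.isSome := by
    funext r; cases hr : r.1 <;> simp [hr]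
  have hpred2 : (fun r : Option String × String => !(!(r.1 == none))) = fun r => r.1.isNone := by
    funext r; cases hr : r.1 <;> simp [hr]
  set n := (content.length : Int) with hn
  set fuel := (n - start_idx).toNat with hfuel
  set rows := bRows content start_idx with hrowsdef
  set hh := rows.findIdx (fun r => r.1 == none) with hhdef
  have hhlen : hh = (rows.takeWhile (fun r => r.1.isSome)).length := by
    rw [hhdef, findIdx_eq_length_takeWhile, hpred1]
  set hdr := rows.takeWhile (fun r => r.1.isSome) with hhdr
  have htake : rows.take hh = hdr := by
    rw [hhlen, hhdr, take_length_takeWhile]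
  set body := rows.drop hh with hbody
  set d := body.findIdx (fun r => !(r.1 == none)) with hddef
  have hdlen : d = (body.takeWhile (fun r => r.1.isNone)).length := by
    rw [hddef, findIdx_eq_length_takeWhile, hpred2]
  -- A's loops in terms of the pipeline quantities
  have houter := outer_eq content fuel start_idx PySem.Dict.empty (le_refl _)
  have hp1 := phase1_eq content fuel start_idx PySem.Dict.empty (le_refl _)
  have hp2idx : (bPhase1 content fuel start_idx PySem.Dict.empty).2 = start_idx + hh := by
    rw [hp1, hhlen]
  have hbodyrows : bRows content (start_idx + hh) = body := by
    rw [hbody, hrowsdef]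
    unfold bRows
    rw [← hn, ← pyRange_drop n hh start_idx]
    simp [List.map_drop]
  have hbodylen : body.length = (n - (start_idx + hh)).toNat := by
    rw [← hbodyrows]
    unfold bRows
    rw [← hn, List.length_map, PySem.List.length_pyRange_one]
  have hfge : (n - (start_idx + (hh : Int))).toNat ≤ fuel := by
    rw [hfuel]; omega
  have hph2 : bPhase2 content fuel (start_idx + hh) = start_idx + hh + d := by
    rw [phase2_eq content fuel (start_idx + hh) hfge, hbodyrows, hdlen]
  have hdle : d ≤ (n - (start_idx + (hh : Int))).toNat := by
    rw [hdlen, ← hbodylen]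
    exact (List.takeWhile_sublist _).length_le
  have hframe :
      (PySem.List.pyRange (start_idx + hh) (start_idx + hh + d) 1).map
        (fun j => PySem.Str.strip (pvGetS content j)) =
      (body.take d).map (fun r => PySem.Str.strip r.2) := by
    rw [← hbodyrows]
    unfold bRows
    rw [← hn, ← pyRange_take n d (start_idx + hh) hdle]
    simp only [List.map_take, List.map_map]
    rfl
  have hall : ∀ r ∈ hdr, r.1 ≠ none := by
    intro r hr
    have := List.mem_takeWhile_imp (hhdr ▸ hr)
    simp only [Option.isSome_iff_ne_none] at this
    exact this
  have hget : ∀ p : String,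
      ((hdr.foldl (fun acc r => acc.insert (r.1.getD "") r.2) PySem.Dict.empty).get? p) =
        bLast hdr p := by
    intro p
    rw [get?_foldl_insert _ _ _ hall]
    unfold bLast
    cases hdr.reverse.find? (fun r => r.1 == some p) with
    | none => simp [PySem.Dict.get?_empty]
    | some r => simp
  -- assemble both sides
  simp only [PySem.Dict.get?_empty] at houter
  refine Eq.trans houter ?_
  rw [hp1]
  simp only []
  rw [show start_idx + ((rows.takeWhile (fun r => r.1.isSome)).length : Int) = start_idx + hh from by rw [hhlen]]
  rw [hph2, hframe]
  have hg1 := hget "t ="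
  have hg2 := hget "b ="
  have hg3 := hget "E ="
  rw [hhdr] at hg1 hg2 hg3
  rw [hg1, hg2, hg3]
  simp only [extract_frame_data_alt]
  rw [← hrowsdef, ← hhdef, htake, ← hbody, ← hddef, ← hhdr]
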